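-- pv_equiv track=rewrite | github.com/Yashgoswami-ds/endee | search.py | _parse_knowledge_entries
-- ===== SOURCE A (Python) =====
-- def _parse_knowledge_entries(raw_text):
--     """Parse knowledge file into entries tagged by source type."""
--     entries = []
--     chunks = [c.strip() for c in raw_text.split("\n\n") if c.strip()]
--
--     current_source = "local"
--     for chunk in chunks:
--         if chunk.lower().startswith("--- from pdf:"):
--             current_source = "pdf"
--             continue
--
--         entries.append({
--             "text": chunk,
--             "source": current_source,
--         })
--
--     return entries
-- ===== SOURCE B (Python) =====
-- def _parse_knowledge_entries(raw_text):
--     """Parse knowledge file into entries tagged by source type."""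
--     chunks = [c.strip() for c in raw_text.split("\n\n") if c.strip()]
--     is_marker = [c.lower().startswith("--- from pdf:") for c in chunks]
--     split = next((i for i, m in enumerate(is_marker) if m), len(chunks))
--     return [
--         {"text": c, "source": "pdf" if i > split else "local"}
--         for i, c in enumerate(chunks)
--         if not is_marker[i]
--     ]
-- ===== Notes on version B (the rewrite author's own statement) =====
-- stated objective: alternative
-- what changed: A's stateful single pass (a current_source flag flipped by the marker chunk) is replaced by locating the index of the first PDF marker and building the entries with one partitioned comprehension that tags each non-marker chunk by its position relative to that index.
import Mathlib
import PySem

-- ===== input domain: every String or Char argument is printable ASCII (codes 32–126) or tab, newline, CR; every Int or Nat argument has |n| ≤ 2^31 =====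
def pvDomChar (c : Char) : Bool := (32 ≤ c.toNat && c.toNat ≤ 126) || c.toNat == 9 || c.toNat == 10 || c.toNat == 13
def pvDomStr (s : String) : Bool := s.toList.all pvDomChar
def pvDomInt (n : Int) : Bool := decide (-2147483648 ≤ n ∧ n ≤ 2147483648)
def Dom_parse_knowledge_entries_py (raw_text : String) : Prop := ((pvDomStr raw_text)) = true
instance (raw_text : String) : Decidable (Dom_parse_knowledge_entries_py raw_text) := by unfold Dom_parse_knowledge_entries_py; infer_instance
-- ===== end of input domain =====

-- B replaces A's stateful single pass (current_source flag) by locate-the-first-marker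
-- then a partitioned comprehension tagging by position; objective: alternative decomposition (same cost).

-- shared helpers: both Python versions compute the chunk list and the marker test by the same code
def pvChunks (raw_text : String) : List String :=
  (((PySem.Str.split? raw_text "\n\n").getD []).filter
      (fun c => PySem.Str.strip c != "")).map PySem.Str.strip

def pvMarker (c : String) : Bool :=
  PySem.Str.startswith (PySem.Str.lower c) "--- from pdf:"

-- ===== PORT A =====
def pvStepA (st : String × List (List (String × String))) (chunk : String) :
    String × List (List (String × String)) :=
  if pvMarker chunk then ("pdf", st.2)
  else (st.1, st.2 ++ [[("text", chunk), ("source", st.1)]])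

def parse_knowledge_entries_py (raw_text : String) : List (List (String × String)) :=
  let chunks := pvChunks raw_text
  (chunks.foldl pvStepA ("local", [])).2

-- ===== PORT B =====
def pvTagB (split : Int) (ic : Int × String) : Option (List (String × String)) :=
  if pvMarker ic.2 then none
  else some [("text", ic.2), ("source", if split < ic.1 then "pdf" else "local")]

def parse_knowledge_entries_py_alt (raw_text : String) : List (List (String × String)) :=
  let chunks := pvChunks raw_text
  let isMarker := chunks.map pvMarker
  let split : Nat := (List.findIdx? (fun m => m) isMarker).getD chunks.length
  (PySem.List.enumerate chunks).filterMap (pvTagB (split : Int))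

-- ===== PRECONDITION & SPEC =====
def Spec_parse_knowledge_entries_py (raw_text : String) (out : List (List (String × String))) : Prop := out = parse_knowledge_entries_py_alt raw_text
instance (raw_text : String) (out : List (List (String × String))) : Decidable (Spec_parse_knowledge_entries_py raw_text out) := by unfold Spec_parse_knowledge_entries_py; infer_instance

-- ===== CLAIM (what is proved, stated in full; the proofs are below) =====
def Claim_equal_parse_knowledge_entries_py : Prop := ∀ (raw_text : String), Dom_parse_knowledge_entries_py raw_text → Spec_parse_knowledge_entries_py raw_text (parse_knowledge_entries_py raw_text)

-- ===== LEMMAS AND PROOFS =====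

-- A's loop: the accumulator only collects output at the end
theorem pv_foldl_acc (L : List String) (src : String)
    (acc : List (List (String × String))) :
    (L.foldl pvStepA (src, acc)).2 = acc ++ (L.foldl pvStepA (src, [])).2 := by
  induction L generalizing src acc with
  | nil => simp
  | cons c rest ih =>
    simp only [List.foldl_cons, pvStepA]
    by_cases h : pvMarker c
    · rw [if_pos h, if_pos h]; exact ih "pdf" acc
    · rw [if_neg h, if_neg h]
      rw [ih src (acc ++ [[("text", c), ("source", src)]]),
          ih src ([] ++ [[("text", c), ("source", src)]])]
      simp

-- once the source is "pdf", A emits every non-marker chunk tagged "pdf"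
theorem pv_foldl_pdf (L : List String) :
    (L.foldl pvStepA ("pdf", [])).2
      = (L.filter (fun c => !pvMarker c)).map
          (fun c => [("text", c), ("source", "pdf")]) := by
  induction L with
  | nil => simp
  | cons c rest ih =>
    simp only [List.foldl_cons, pvStepA]
    by_cases h : pvMarker c
    · rw [if_pos h]
      simp [h, ih]
    · rw [if_neg h]
      rw [pv_foldl_acc]
      simp [h, ih]

-- B past the marker: all positions exceed split, so everything non-marker is "pdf"
theorem pv_tag_all_pdf (L : List String) (s split : Int) (h : split < s) :
    (PySem.List.enumerate L s).filterMap (pvTagB split)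
      = (L.filter (fun c => !pvMarker c)).map
          (fun c => [("text", c), ("source", "pdf")]) := by
  induction L generalizing s with
  | nil => simp [PySem.List.enumerate_nil]
  | cons c rest ih =>
    rw [PySem.List.enumerate_cons, List.filterMap_cons]
    by_cases hm : pvMarker c
    · have h1 : pvTagB split (s, c) = none := by simp [pvTagB, hm]
      rw [h1, ih (s + 1) (by omega)]
      simp [hm]
    · have h1 : pvTagB split (s, c) = some [("text", c), ("source", "pdf")] := by
        simp [pvTagB, hm, h]
      rw [h1, ih (s + 1) (by omega)]
      simp [hm]

-- B is invariant under shifting both the start index and split together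
theorem pv_tag_shift (L : List String) (s split t : Int) :
    (PySem.List.enumerate L (s + t)).filterMap (pvTagB (split + t))
      = (PySem.List.enumerate L s).filterMap (pvTagB split) := by
  induction L generalizing s with
  | nil => simp [PySem.List.enumerate_nil]
  | cons c rest ih =>
    rw [PySem.List.enumerate_cons, PySem.List.enumerate_cons,
        List.filterMap_cons, List.filterMap_cons]
    have hlt : (split + t < s + t) = (split < s) := propext (by omega)
    have hs : s + t + 1 = (s + 1) + t := by ring
    have h1 : pvTagB (split + t) (s + t, c) = pvTagB split (s, c) := by
      simp only [pvTagB, hlt]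
    rw [h1, hs, ih (s + 1)]

-- the main list-level equivalence
theorem pv_main (L : List String) :
    (L.foldl pvStepA ("local", [])).2
      = (PySem.List.enumerate L).filterMap
          (pvTagB ((((List.findIdx? (fun m => m) (L.map pvMarker)).getD L.length : Nat)) : Int)) := by
  induction L with
  | nil => simp [PySem.List.enumerate_nil]
  | cons c rest ih =>
    simp only [List.foldl_cons, pvStepA, List.map_cons, List.findIdx?_cons]
    by_cases hm : pvMarker c
    · rw [if_pos hm, if_pos hm]
      rw [pv_foldl_pdf]
      rw [PySem.List.enumerate_cons, List.filterMap_cons]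
      simp only [Option.getD_some, Nat.cast_zero]
      have h1 : pvTagB 0 ((0 : Int), c) = none := by simp [pvTagB, hm]
      simp only [zero_add]
      rw [h1, pv_tag_all_pdf rest 1 0 (by omega)]
    · rw [if_neg hm, if_neg hm]
      rw [pv_foldl_acc]
      rw [PySem.List.enumerate_cons, List.filterMap_cons]
      have hsplit :
          (((Option.map (· + 1) (List.findIdx? (fun m => m) (rest.map pvMarker))).getD
              (rest.length + 1) : Nat) : Int)
            = (((List.findIdx? (fun m => m) (rest.map pvMarker)).getD rest.length : Nat) : Int) + 1 := by
        cases List.findIdx? (fun m => m) (rest.map pvMarker) <;> simp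
      simp only [List.length_cons, hsplit]
      set k : Int := (((List.findIdx? (fun m => m) (rest.map pvMarker)).getD rest.length : Nat) : Int) with hk
      have hk0 : 0 ≤ k := by positivity
      have h1 : pvTagB (k + 1) ((0 : Int), c) = some [("text", c), ("source", "local")] := by
        simp only [pvTagB, hm, Bool.false_eq_true, if_false]
        have : ¬ (k + 1 < (0 : Int)) := by omega
        simp [this]
      simp only [zero_add]
      rw [h1]
      have hshift := pv_tag_shift rest 0 k 1
      simp only [zero_add] at hshift
      rw [hshift, ← ih]
      simp

-- ===== VERDICT (by name: the statement is the Claim_ definition above) =====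
theorem parse_knowledge_entries_py_spec : Claim_equal_parse_knowledge_entries_py := by
  intro raw_text _
  unfold Spec_parse_knowledge_entries_py parse_knowledge_entries_py parse_knowledge_entries_py_alt
  exact pv_main (pvChunks raw_text)
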